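-- pv_equiv track=rewrite | github.com/kkr010128/codebert | problem183/problem183_137.py | check
-- ===== SOURCE A (Python) =====
-- def check(num,k):
--     if k==1:
--         return False
--
--     while num>=k:
--         if num%k==0:
--             num=num//k
--         else:
--             break
--     num%=k
--     return num==1
-- ===== SOURCE B (Python) =====
-- def check(num, k):
--     # For k <= 0 no value can be congruent to 1 mod k (Python residues have the
--     # divisor's sign), and k == 1 is explicitly False, so any k <= 1 fails.
--     if k <= 1:
--         return False
--     # Exponent of the largest power of k that divides num while staying <= num,
--     # found without ever modifying num.
--     e = 0
--     while num % k ** (e + 1) == 0 and num >= k ** (e + 1):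
--         e += 1
--     return num // k ** e % k == 1
-- ===== Notes on version B (the rewrite author's own statement) =====
-- stated objective: alternative
-- what changed: Instead of destructively dividing num by k in a while-loop and testing the leftover, B leaves num untouched, searches for the exponent e of the largest admissible dividing power k**(e+1) over a loop of growing powers, performs a single division num // k**e at the end, and short-circuits every k <= 1 to False (residue 1 mod k is impossible for k <= 0).
import Mathlib
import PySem

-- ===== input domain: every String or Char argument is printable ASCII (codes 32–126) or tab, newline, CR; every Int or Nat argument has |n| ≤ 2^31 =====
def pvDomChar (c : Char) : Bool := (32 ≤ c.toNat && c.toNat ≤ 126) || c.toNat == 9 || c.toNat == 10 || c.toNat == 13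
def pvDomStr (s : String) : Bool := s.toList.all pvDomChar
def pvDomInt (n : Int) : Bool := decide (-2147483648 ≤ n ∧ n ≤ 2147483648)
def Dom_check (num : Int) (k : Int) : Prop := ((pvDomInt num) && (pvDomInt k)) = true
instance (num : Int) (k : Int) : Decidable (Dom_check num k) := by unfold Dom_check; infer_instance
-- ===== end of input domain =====

-- B replaces A's destructive divide-num-down loop by a non-destructive search for the
-- exponent of the largest admissible dividing power of k, one final division, and a
-- k ≤ 1 shortcut (objective: alternative decomposition, same cost).

-- ===== PORT A =====
-- A's while-loop; fuel is only a totality guard (wherever the Python loop terminates,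
-- |num| strictly decreases at each step, so natAbs + 2 fuel is never exhausted).
def checkLoop (fuel : Nat) (num k : Int) : Int :=
  match fuel with
  | 0 => num
  | f + 1 =>
    if num ≥ k then
      if PySem.Int.mod num k = 0 then checkLoop f (PySem.Int.floordiv num k) k
      else num
    else num

def check (num : Int) (k : Int) : Bool :=
  if k = 1 then false
  else
    let n := checkLoop (num.natAbs + 2) num k
    decide (PySem.Int.mod n k = 1)

-- ===== PORT B =====
-- B's exponent search; fuel is only a totality guard (the loop needs k^(e+1) ≤ num
-- with k ≥ 2, so it runs fewer than natAbs + 2 times).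
def expSearch (fuel : Nat) (num k : Int) (e : Nat) : Nat :=
  match fuel with
  | 0 => e
  | f + 1 =>
    if PySem.Int.mod num (k ^ (e + 1)) = 0 ∧ num ≥ k ^ (e + 1) then expSearch f num k (e + 1)
    else e

def check_alt (num : Int) (k : Int) : Bool :=
  if k ≤ 1 then false
  else
    let e := expSearch (num.natAbs + 2) num k 0
    decide (PySem.Int.mod (PySem.Int.floordiv num (k ^ e)) k = 1)

-- ===== PRECONDITION & SPEC =====
-- Pre_ excludes k = 0 (A always raises ZeroDivisionError there) and the inputs on which A's while-loop
-- never terminates: k = -1 with num ∈ {-1, 0, 1}, and k ≤ -2 with num = 0.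
def Pre_check (num : Int) (k : Int) : Prop :=
  k ≠ 0 ∧ ¬(k = -1 ∧ -1 ≤ num ∧ num ≤ 1) ∧ ¬(k ≤ -2 ∧ num = 0)
instance (num : Int) (k : Int) : Decidable (Pre_check num k) := by unfold Pre_check; infer_instance

def pvWitness_check : Int × Int := (8, 2)

def Spec_check (num : Int) (k : Int) (out : Bool) : Prop := out = check_alt num k
instance (num : Int) (k : Int) (out : Bool) : Decidable (Spec_check num k out) := by unfold Spec_check; infer_instance

-- ===== CLAIM (what is proved, stated in full; the proofs are below) =====
def Claim_equal_check : Prop := ∀ (num : Int) (k : Int), Dom_check num k → Pre_check num k → Spec_check num k (check num k)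

-- ===== LEMMAS AND PROOFS =====

-- For a negative modulus the Python residue is nonpositive, so it is never 1.
lemma mod_ne_one_of_neg (x k : Int) (hk : k < 0) : PySem.Int.mod x k ≠ 1 := by
  have h := PySem.Int.mod_neg_bounds x (b := k) hk
  omega

-- Core invariant, k ≥ 2: running A's loop on the exact quotient num / k^e computes the
-- exact quotient of num by k to the exponent B's search reaches from e.
lemma checkLoop_eq_expSearch (f : Nat) (num k : Int) (hk : 2 ≤ k) :
    ∀ e : Nat, (k ^ e ∣ num) →
      checkLoop f (PySem.Int.floordiv num (k ^ e)) k
        = PySem.Int.floordiv num (k ^ (expSearch f num k e)) := by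
  induction f with
  | zero => intro e _; rfl
  | succ f ih =>
    intro e hdvd
    obtain ⟨m, hm⟩ := hdvd
    have hkpow : (0:Int) < k ^ e := pow_pos (by omega) e
    have hkpow1 : (0:Int) < k ^ (e + 1) := pow_pos (by omega) (e + 1)
    have hfd : PySem.Int.floordiv num (k ^ e) = m := by
      rw [hm, PySem.Int.floordiv_eq_iff_of_pos hkpow]
      constructor
      · nlinarith
      · nlinarith
    -- the two stepping conditions are equivalent
    have hdvd_iff : PySem.Int.mod m k = 0 ↔ PySem.Int.mod num (k ^ (e + 1)) = 0 := by
      rw [PySem.Int.mod_eq_zero_iff_dvd, PySem.Int.mod_eq_zero_iff_dvd]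
      constructor
      · rintro ⟨c, hc⟩; exact ⟨c, by rw [hm, hc]; ring⟩
      · rintro ⟨c, hc⟩
        refine ⟨c, ?_⟩
        have : k ^ e * m = k ^ e * (k * c) := by rw [← hm, hc]; ring
        exact mul_left_cancel₀ (by positivity) this
    have hge_iff : m ≥ k ↔ num ≥ k ^ (e + 1) := by
      rw [hm, pow_succ]
      exact ⟨fun h => by nlinarith, fun h => le_of_mul_le_mul_left h hkpow⟩
    simp only [checkLoop, expSearch, hfd]
    by_cases hc1 : m ≥ k
    · by_cases hc2 : PySem.Int.mod m k = 0
      · rw [if_pos hc1, if_pos hc2,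
            if_pos ⟨hdvd_iff.mp hc2, hge_iff.mp hc1⟩]
        have hdvd1 : k ^ (e + 1) ∣ num := by
          rw [← PySem.Int.mod_eq_zero_iff_dvd]; exact hdvd_iff.mp hc2
        have hstep : PySem.Int.floordiv m k = PySem.Int.floordiv num (k ^ (e + 1)) := by
          obtain ⟨c, hc⟩ := hdvd1
          have hmc : m = k * c := by
            have : k ^ e * m = k ^ e * (k * c) := by
              rw [← hm, hc, pow_succ]; ring
            exact mul_left_cancel₀ (by positivity) this
          have h1 : PySem.Int.floordiv m k = c := by
            rw [hmc, PySem.Int.floordiv_eq_iff_of_pos (by omega : (0:Int) < k)]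
            constructor
            · nlinarith
            · nlinarith
          have h2 : PySem.Int.floordiv num (k ^ (e + 1)) = c := by
            rw [hc, PySem.Int.floordiv_eq_iff_of_pos hkpow1]
            constructor
            · nlinarith
            · nlinarith
          rw [h1, h2]
        rw [hstep]
        have := ih (e + 1) (by rw [← PySem.Int.mod_eq_zero_iff_dvd]; exact hdvd_iff.mp hc2)
        rw [← this]
      · rw [if_pos hc1, if_neg hc2,
            if_neg (by intro h; exact hc2 (hdvd_iff.mpr h.1)), hfd]
    · rw [if_neg hc1, if_neg (by intro h; exact hc1 (hge_iff.mpr h.2)), hfd]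

lemma floordiv_one (x : Int) : PySem.Int.floordiv x 1 = x := by
  rw [PySem.Int.floordiv_eq_ediv_of_pos one_pos]; exact Int.ediv_one x

-- ===== VERDICT (by name: the statement is the Claim_ definition above) =====
theorem check_spec : Claim_equal_check := by
  intro num k _ hpre
  unfold Spec_check check check_alt
  rcases lt_trichotomy k 1 with hk | hk | hk
  · -- k ≤ 0 (k = 0 excluded by Pre): A's final residue is mod by a negative k, never 1
    have hk0 : k < 0 := by rcases hpre with ⟨h0, -⟩; omega
    rw [if_neg (by omega : ¬ k = 1), if_pos (by omega : k ≤ 1)]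
    simp [mod_ne_one_of_neg _ _ hk0]
  · subst hk; simp
  · -- k ≥ 2
    rw [if_neg (by omega : ¬ k = 1), if_neg (by omega : ¬ k ≤ 1)]
    have h := checkLoop_eq_expSearch (num.natAbs + 2) num k (by omega) 0 (by simp)
    rw [pow_zero, floordiv_one] at h
    rw [h]
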